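-- pv_equiv track=rewrite | github.com/miliar/Code_Jam_Webscraper | solutions_python/Problem_180/1843.py | make
-- ===== SOURCE A (Python) =====
-- def make(s, c, src):
--     if c == 1:
--         return s
--
--     t = ""
--     for x in s:
--         if x == "G":
--             t += len(src) * "G"
--         else:
--             t += src
--     return make(t, c - 1, src)
-- ===== SOURCE B (Python) =====
-- def make(s, c, src):
--     t = s
--     for _ in range(c - 1):
--         t = "".join("G" * len(src) if x == "G" else src for x in t)
--     return t
-- ===== Notes on version B (the rewrite author's own statement) =====
-- stated objective: simpler
-- what changed: Replaces the tail recursion (with its string-accumulating inner loop via +=) by a flat for-loop over range(c-1) that rebuilds the string with a ''.join comprehension.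
import Mathlib
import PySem

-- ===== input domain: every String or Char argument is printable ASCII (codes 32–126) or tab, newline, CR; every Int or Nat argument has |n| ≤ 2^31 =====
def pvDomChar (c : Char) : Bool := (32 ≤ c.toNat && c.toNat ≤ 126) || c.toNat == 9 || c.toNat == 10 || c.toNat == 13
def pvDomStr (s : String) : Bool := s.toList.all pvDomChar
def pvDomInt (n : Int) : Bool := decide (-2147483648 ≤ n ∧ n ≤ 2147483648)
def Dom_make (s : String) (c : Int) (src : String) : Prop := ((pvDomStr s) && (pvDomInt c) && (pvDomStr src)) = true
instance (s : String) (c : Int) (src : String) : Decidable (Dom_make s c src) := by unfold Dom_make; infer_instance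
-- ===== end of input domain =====

-- B replaces A's tail recursion by a flat loop over range(c-1) with a ''.join rebuild (objective: simpler).

-- ===== PORT A =====
-- One step of A's inner loop: t += "G"*len(src) if x == "G" else t += src  (exact on the ASCII domain)
def makeStepA (src : List Char) (t : List Char) (x : Char) : List Char :=
  if x = 'G' then t ++ List.replicate src.length 'G' else t ++ src

-- A's recursion, with fuel = c - 1 supplied by `make` (fuel only makes the recursion total;
-- for c ≥ 1 it is never exhausted, and c < 1 is excluded by Pre_make since Python A raises there)
def makeA (fuel : Nat) (s : List Char) (c : Int) (src : List Char) : List Char :=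
  if c = 1 then s
  else match fuel with
    | 0 => s
    | n + 1 => makeA n (s.foldl (makeStepA src) []) (c - 1) src

def make (s : String) (c : Int) (src : String) : String :=
  String.ofList (makeA (c - 1).toNat s.toList c src.toList)

-- ===== PORT B =====
-- ''.join("G" * len(src) if x == "G" else src for x in t)   (''.join = List.flatten on char lists)
def expandB (src : List Char) (t : List Char) : List Char :=
  (t.map (fun x => if x = 'G' then List.replicate src.length 'G' else src)).flatten

def make_alt (s : String) (c : Int) (src : String) : String :=
  String.ofList ((List.range (c - 1).toNat).foldl (fun t _ => expandB src.toList t) s.toList)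

-- ===== PRECONDITION & SPEC =====
-- Pre_make excludes exactly c < 1, where Python A recurses without bound and raises RecursionError.
def Pre_make (s : String) (c : Int) (src : String) : Prop := 1 ≤ c
instance (s : String) (c : Int) (src : String) : Decidable (Pre_make s c src) := by unfold Pre_make; infer_instance
def pvWitness_make : String × Int × String := ("GAB", 2, "xy")

def Spec_make (s : String) (c : Int) (src : String) (out : String) : Prop := out = make_alt s c src
instance (s : String) (c : Int) (src : String) (out : String) : Decidable (Spec_make s c src out) := by unfold Spec_make; infer_instance

-- ===== CLAIM (what is proved, stated in full; the proofs are below) =====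
def Claim_equal_make : Prop := ∀ (s : String) (c : Int) (src : String), Dom_make s c src → Pre_make s c src → Spec_make s c src (make s c src)

-- ===== LEMMAS AND PROOFS =====

-- A's inner += loop produces exactly B's joined expansion, appended to the accumulator.
theorem foldl_stepA (src : List Char) : ∀ (l t : List Char),
    l.foldl (makeStepA src) t = t ++ expandB src l := by
  intro l
  induction l with
  | nil => intro t; simp [expandB]
  | cons x xs ih =>
      intro t
      simp only [List.foldl_cons, ih, makeStepA, expandB, List.map_cons, List.flatten_cons]
      split_ifs <;> simp

-- B's element-ignoring foldl over range n is n-fold iteration.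
theorem foldl_range_iterate {α : Type} (g : α → α) : ∀ (n : Nat) (s : α),
    (List.range n).foldl (fun t _ => g t) s = g^[n] s := by
  intro n
  induction n with
  | zero => intro s; simp
  | succ n ih =>
      intro s
      rw [List.range_succ, List.foldl_append, ih, List.foldl_cons, List.foldl_nil,
        Function.iterate_succ_apply']

-- A's recursion at c = n + 1 with fuel n is n-fold iteration of the expansion step.
theorem makeA_iterate (src : List Char) : ∀ (n : Nat) (s : List Char),
    makeA n s ((n : Int) + 1) src = (expandB src)^[n] s := by
  intro n
  induction n with
  | zero => intro s; norm_num [makeA]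
  | succ n ih =>
      intro s
      have hne : (((n + 1 : Nat) : Int) + 1) ≠ 1 := by push_cast; omega
      have hc : (((n + 1 : Nat) : Int) + 1 - 1) = (n : Int) + 1 := by push_cast; ring
      simp only [makeA, hne, if_false, hc]
      rw [foldl_stepA, List.nil_append, ih, ← Function.iterate_succ_apply]

-- ===== VERDICT (by name: the statement is the Claim_ definition above) =====
theorem make_spec : Claim_equal_make := by
  intro s c src _ hpre
  unfold Spec_make make make_alt
  obtain ⟨n, hn⟩ : ∃ n : Nat, c = (n : Int) + 1 :=
    ⟨(c - 1).toNat, by unfold Pre_make at hpre; omega⟩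
  subst hn
  have h1 : ((n : Int) + 1 - 1).toNat = n := by omega
  rw [h1, makeA_iterate, foldl_range_iterate]
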